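-- pv_equiv track=rewrite | github.com/Kireiidatte/Algorithm | Programmers/방금그곡.py | solution
-- ===== SOURCE A (Python) =====
-- change = {'C#':'H', 'D#':'I', 'F#':'J', 'A#':'K', 'G#':'L', 'E#':'M', 'B#':'N'}
--
-- def change_score(score):
--     j = 0
--     new_score = ''
--
--     while j < len(score):
--         if j+1 < len(score) and score[j+1] == '#':
--             new_score += change[score[j] + score[j+1]]
--             j += 2
--         else:
--             new_score += score[j]
--             j += 1
--
--     return new_score
--
-- def solution(m, musicinfos):
--     answer = ''
--     m = change_score(m)
--     correct_list = []
--     for i in range(len(musicinfos)):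
--         info = musicinfos[i].split(',')
--         new_score = change_score(info[3])
--         # 재생시간 계산
--         hour = (int(info[1][:2]) - int(info[0][:2])) * 60
--         minute = int(info[1][3:]) - int(info[0][3:])
--
--         play_time = hour + minute
--         tmp = play_time
--         plays = ''
--
--         # 재생시간이 음악 길이보다 큰 경우 => 음악 반복
--         if tmp > len(new_score):
--             while True:
--                 if tmp < len(new_score):
--                     plays += new_score[:tmp]
--                     break
--                 plays += new_score
--                 tmp -= len(new_score)
--         # 재생시간이 음악 길이보다 작은 경우 => 해당 길이만큼만 음악 재생
--         else:
--             plays = new_score[:play_time]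
--
--         if m in plays:
--             correct_list.append([play_time, i, info[2]])
--
--     correct_list.sort(key=lambda x : (-x[0], x[1]))
--
--     if correct_list:
--         return correct_list[0][2]
--     else:
--         return '(None)'
-- ===== SOURCE B (Python) =====
-- change = {'C#':'H', 'D#':'I', 'F#':'J', 'A#':'K', 'G#':'L', 'E#':'M', 'B#':'N'}
--
-- def melody(s):
--     if not s:
--         return ''
--     pair = s[:2]
--     if pair in change:
--         return change[pair] + melody(s[2:])
--     return s[0] + melody(s[1:])
--
-- def solution(m, musicinfos):
--     target = melody(m)
--     best = None
--     for i, info in enumerate(musicinfos):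
--         parts = info.split(',')
--         tune = melody(parts[3])
--         play_time = (int(parts[1][:2]) - int(parts[0][:2])) * 60 \
--                     + int(parts[1][3:]) - int(parts[0][3:])
--         L = len(tune)
--         if play_time > L:
--             plays = tune * (play_time // L) + tune[:play_time % L]
--         else:
--             plays = tune[:play_time]
--         if target in plays and (best is None or play_time > best[0]):
--             best = (play_time, parts[2])
--     return best[1] if best is not None else '(None)'
-- ===== Notes on version B (the rewrite author's own statement) =====
-- stated objective: simpler
-- what changed: change_score's index-walk with explicit '#'-lookahead becomes a two-character-slice recursion driven by dict membership, the repeat-the-melody while loop becomes closed-form divmod repetition (tune * (t // L) + tune[:t % L]), and the candidate list + sort by (-play_time, i) + take-first becomes a single-pass running best with strict-improvement tie-breaking.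
import Mathlib
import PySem

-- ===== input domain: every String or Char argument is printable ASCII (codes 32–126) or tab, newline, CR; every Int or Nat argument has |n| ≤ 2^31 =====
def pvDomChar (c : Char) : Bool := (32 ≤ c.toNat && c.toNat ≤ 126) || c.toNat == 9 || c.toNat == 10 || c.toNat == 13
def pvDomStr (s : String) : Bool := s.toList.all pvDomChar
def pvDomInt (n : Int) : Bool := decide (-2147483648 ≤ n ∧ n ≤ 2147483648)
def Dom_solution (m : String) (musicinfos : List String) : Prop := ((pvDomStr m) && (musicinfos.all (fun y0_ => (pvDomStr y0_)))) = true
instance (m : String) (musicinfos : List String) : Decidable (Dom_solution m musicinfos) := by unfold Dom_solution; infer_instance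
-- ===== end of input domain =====

-- B simplifies A three ways (same return value, proved on Pre_): a recursive dict-membership
-- melody rewrite, closed-form divmod repetition instead of the repeat-while loop, and a
-- single-pass running best instead of build-list-then-sort.

-- the module-level dict change = {'C#':'H', …} (keys/values as char lists)
def pvChange : PySem.Dict (List Char) (List Char) :=
  PySem.Dict.ofList [(['C','#'],['H']),(['D','#'],['I']),(['F','#'],['J']),(['A','#'],['K']),
                     (['G','#'],['L']),(['E','#'],['M']),(['B','#'],['N'])]

-- ===== PORT A =====

-- change_score's while loop over index j; none = KeyError on change[score[j]+score[j+1]]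
def csA (l : List Char) (j : Nat) (acc : List Char) : Option (List Char) :=
  if j < l.length then
    if j + 1 < l.length ∧ l.getD (j+1) ' ' = '#' then
      match PySem.Dict.get? pvChange [l.getD j ' ', l.getD (j+1) ' '] with
      | some r => csA l (j+2) (acc ++ r)
      | none => none
    else csA l (j+1) (acc ++ [l.getD j ' '])
  else some acc
termination_by l.length - j

-- the 'while True' repetition loop; none marks Python's divergence on an empty melody
def playLoopA (ns : List Char) (tmp : Int) (plays : List Char) : Option (List Char) :=
  if ns.length = 0 then none
  else if tmp < (ns.length : Int) then some (plays ++ PySem.List.slice ns none (some tmp))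
  else playLoopA ns (tmp - ns.length) (plays ++ ns)
termination_by tmp.toNat
decreasing_by omega

-- one iteration of A's for-loop body (p = (i, musicinfos[i])); none = any raise inside it
def itemA (mL : List Char) (cl : List (Int × Int × String)) (p : Int × String) :
    Option (List (Int × Int × String)) :=
  let info := PySem.Chars.splitOn p.2.toList [',']
  match info[3]? with
  | none => none
  | some sc =>
    match csA sc 0 [] with
    | none => none
    | some ns =>
      match PySem.Int.ofChars? (PySem.List.slice (info.getD 1 []) none (some 2)),
            PySem.Int.ofChars? (PySem.List.slice (info.getD 0 []) none (some 2)),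
            PySem.Int.ofChars? (PySem.List.slice (info.getD 1 []) (some 3) none),
            PySem.Int.ofChars? (PySem.List.slice (info.getD 0 []) (some 3) none) with
      | some e2, some s2, some em, some sm =>
        let hour := (e2 - s2) * 60
        let minute := em - sm
        let play_time := hour + minute
        let plays? : Option (List Char) :=
          if play_time > (ns.length : Int) then playLoopA ns play_time []
          else some (PySem.List.slice ns none (some play_time))
        match plays? with
        | none => none
        | some plays =>
          some (if PySem.Chars.isIn mL plays then
                  cl ++ [(play_time, p.1, String.ofList (info.getD 2 []))] else cl)
      | _, _, _, _ => none

-- A: 'for i in range(len(musicinfos)): … musicinfos[i] …' traversed as its enumeration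
def solution (m : String) (musicinfos : List String) : String :=
  match csA m.toList 0 [] with
  | none => ""          -- A raises (KeyError); excluded by Pre_
  | some mL =>
    match (PySem.List.enumerate musicinfos).foldl
        (fun acc p => match acc with | none => none | some cl => itemA mL cl p) (some []) with
    | none => ""        -- A raises or diverges; excluded by Pre_
    | some cl =>
      match PySem.List.sorted2 cl (fun x => -x.1) (fun x => x.2.1) with
      | [] => "(None)"
      | h :: _ => h.2.2

-- ===== PORT B =====

-- B's melody: recursion on the string, branching on s[:2] ∈ change
def melodyB : List Char → List Char
  | [] => []
  | c :: rest =>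
    match PySem.Dict.get? pvChange ((c :: rest).take 2) with
    | some r => r ++ melodyB ((c :: rest).drop 2)
    | none => c :: melodyB rest
termination_by l => l.length
decreasing_by all_goals simp_all

-- one iteration of B's for-loop body; none = any raise inside it
def itemB (target : List Char) (best : Option (Int × String)) (p : Int × String) :
    Option (Option (Int × String)) :=
  let parts := PySem.Chars.splitOn p.2.toList [',']
  match parts[3]? with
  | none => none
  | some sc =>
    let tune := melodyB sc
    match PySem.Int.ofChars? (PySem.List.slice (parts.getD 1 []) none (some 2)),
          PySem.Int.ofChars? (PySem.List.slice (parts.getD 0 []) none (some 2)),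
          PySem.Int.ofChars? (PySem.List.slice (parts.getD 1 []) (some 3) none),
          PySem.Int.ofChars? (PySem.List.slice (parts.getD 0 []) (some 3) none) with
    | some e2, some s2, some em, some sm =>
      let play_time := (e2 - s2) * 60 + em - sm
      let L : Int := tune.length
      match (if play_time > L then
               match PySem.Int.floordiv? play_time L, PySem.Int.mod? play_time L with
               | some q, some r => some (PySem.List.pyRepeat tune q ++ PySem.List.slice tune none (some r))
               | _, _ => none   -- ZeroDivisionError
             else some (PySem.List.slice tune none (some play_time))) with
      | none => none
      | some plays =>
        some (if PySem.Chars.isIn target plays &&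
                  (match best with | none => true | some b => decide (b.1 < play_time)) then
                some (play_time, String.ofList (parts.getD 2 []))
              else best)
    | _, _, _, _ => none

def solution_alt (m : String) (musicinfos : List String) : String :=
  let target := melodyB m.toList
  match (PySem.List.enumerate musicinfos).foldl
      (fun acc p => match acc with | none => none | some best => itemB target best p) (some none) with
  | none => ""          -- B raises; excluded by Pre_
  | some none => "(None)"
  | some (some b) => b.2

-- ===== PRECONDITION & SPEC =====

def pvNotes : List Char := ['C','D','F','A','G','E','B']

-- change_score(s) raises no KeyError iff every '#' hangs off a valid note: at each '#' the
-- predecessor is a note or a (paired) '#', no three '#' in a row, no leading "##".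
def pvNoteOK (l : List Char) : Bool :=
  (List.range l.length).all fun i =>
    l[i]? != some '#' ||
    ((decide (i = 0) || l[i-1]? == some '#' || pvNotes.any fun c => l[i-1]? == some c)
     && !(l[i+1]? == some '#' && l[i+2]? == some '#')
     && (!decide (i = 0) || l[1]? != some '#'))

-- the play time (end minus start, in minutes) read off one info entry, as A parses it
def pvPlayTime (parts : List (List Char)) : Int :=
  ((PySem.Int.ofChars? (PySem.List.slice (parts.getD 1 []) none (some 2))).getD 0
    - (PySem.Int.ofChars? (PySem.List.slice (parts.getD 0 []) none (some 2))).getD 0) * 60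
  + (PySem.Int.ofChars? (PySem.List.slice (parts.getD 1 []) (some 3) none)).getD 0
  - (PySem.Int.ofChars? (PySem.List.slice (parts.getD 0 []) (some 3) none)).getD 0

-- one musicinfos entry on which A's loop body returns: ≥ 4 comma-parts, the four int() calls
-- succeed, the score's '#'s are valid, and (empty score → play time ≤ 0) (else A's repeat
-- loop never terminates)
def pvInfoOK (info : String) : Bool :=
  let parts := PySem.Chars.splitOn info.toList [',']
  decide (4 ≤ parts.length)
  && (PySem.Int.ofChars? (PySem.List.slice (parts.getD 1 []) none (some 2))).isSome
  && (PySem.Int.ofChars? (PySem.List.slice (parts.getD 0 []) none (some 2))).isSome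
  && (PySem.Int.ofChars? (PySem.List.slice (parts.getD 1 []) (some 3) none)).isSome
  && (PySem.Int.ofChars? (PySem.List.slice (parts.getD 0 []) (some 3) none)).isSome
  && pvNoteOK (parts.getD 3 [])
  && (parts.getD 3 [] != ([] : List Char) || decide (pvPlayTime parts ≤ 0))

-- Pre_ = exactly the inputs on which Python A returns normally (otherwise it raises
-- KeyError/IndexError/ValueError or loops forever); no input A returns on is excluded.
def Pre_solution (m : String) (musicinfos : List String) : Prop :=
  pvNoteOK m.toList = true ∧ ∀ info ∈ musicinfos, pvInfoOK info = true

instance (m : String) (musicinfos : List String) : Decidable (Pre_solution m musicinfos) := by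
  unfold Pre_solution; infer_instance

def pvWitness_solution : String × List String := ("ABC", ["12:00,12:14,HELLO,C#DEF"])

def Spec_solution (m : String) (musicinfos : List String) (out : String) : Prop := out = solution_alt m musicinfos
instance (m : String) (musicinfos : List String) (out : String) : Decidable (Spec_solution m musicinfos out) := by unfold Spec_solution; infer_instance

-- ===== CLAIM (what is proved, stated in full; the proofs are below) =====
def Claim_equal_solution : Prop := ∀ (m : String) (musicinfos : List String), Dom_solution m musicinfos → Pre_solution m musicinfos → Spec_solution m musicinfos (solution m musicinfos)

-- ===== LEMMAS AND PROOFS =====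

-- ---- the literal dict, characterized ----

theorem get?_pvChange_eq (k : List Char) : PySem.Dict.get? pvChange k =
    if k = ['C','#'] then some ['H'] else if k = ['D','#'] then some ['I']
    else if k = ['F','#'] then some ['J'] else if k = ['A','#'] then some ['K']
    else if k = ['G','#'] then some ['L'] else if k = ['E','#'] then some ['M']
    else if k = ['B','#'] then some ['N'] else none := by
  have h : pvChange.items = [(['C','#'],['H']),(['D','#'],['I']),(['F','#'],['J']),
      (['A','#'],['K']),(['G','#'],['L']),(['E','#'],['M']),(['B','#'],['N'])] := by decide
  simp only [PySem.Dict.get?, h, List.find?]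
  by_cases h1 : k = ['C','#']
  · subst h1; decide
  rw [if_neg h1]
  have e1 : (['C','#'] == k) = false := by rw [beq_eq_false_iff_ne]; exact fun hh => h1 hh.symm
  simp only [e1]
  by_cases h2 : k = ['D','#']
  · subst h2; decide
  rw [if_neg h2]
  have e2 : (['D','#'] == k) = false := by rw [beq_eq_false_iff_ne]; exact fun hh => h2 hh.symm
  simp only [e2]
  by_cases h3 : k = ['F','#']
  · subst h3; decide
  rw [if_neg h3]
  have e3 : (['F','#'] == k) = false := by rw [beq_eq_false_iff_ne]; exact fun hh => h3 hh.symm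
  simp only [e3]
  by_cases h4 : k = ['A','#']
  · subst h4; decide
  rw [if_neg h4]
  have e4 : (['A','#'] == k) = false := by rw [beq_eq_false_iff_ne]; exact fun hh => h4 hh.symm
  simp only [e4]
  by_cases h5 : k = ['G','#']
  · subst h5; decide
  rw [if_neg h5]
  have e5 : (['G','#'] == k) = false := by rw [beq_eq_false_iff_ne]; exact fun hh => h5 hh.symm
  simp only [e5]
  by_cases h6 : k = ['E','#']
  · subst h6; decide
  rw [if_neg h6]
  have e6 : (['E','#'] == k) = false := by rw [beq_eq_false_iff_ne]; exact fun hh => h6 hh.symm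
  simp only [e6]
  by_cases h7 : k = ['B','#']
  · subst h7; decide
  rw [if_neg h7]
  have e7 : (['B','#'] == k) = false := by rw [beq_eq_false_iff_ne]; exact fun hh => h7 hh.symm
  simp only [e7]
  rfl

theorem get?_pvChange_single (c : Char) : PySem.Dict.get? pvChange [c] = none := by
  simp [get?_pvChange_eq]

theorem get?_pvChange_ne_hash (c d : Char) (hd : d ≠ '#') :
    PySem.Dict.get? pvChange [c, d] = none := by
  simp [get?_pvChange_eq, hd]

theorem get?_pvChange_note (c : Char) (hc : c ∈ pvNotes) :
    (PySem.Dict.get? pvChange [c, '#']).isSome := by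
  simp only [pvNotes, List.mem_cons, List.not_mem_nil, or_false] at hc
  rcases hc with rfl | rfl | rfl | rfl | rfl | rfl | rfl <;> decide

theorem get?_pvChange_some_ne_nil {k r : List Char} (h : PySem.Dict.get? pvChange k = some r) :
    r ≠ [] := by
  rw [get?_pvChange_eq] at h
  split_ifs at h <;>
    first
    | exact Option.noConfusion h
    | (injection h with h; subst h; simp)

-- ---- structural form of A's change_score scan, and the three-way bridge ----

def csS : List Char → Option (List Char)
  | [] => some []
  | [c] => some [c]
  | c :: d :: rest =>
    if d = '#' then
      match PySem.Dict.get? pvChange [c, d] with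
      | some r => (csS rest).map (r ++ ·)
      | none => none
    else (csS (d :: rest)).map (c :: ·)

theorem melodyB_single (c : Char) : melodyB [c] = [c] := by
  rw [melodyB]
  have ht : ([c] : List Char).take 2 = [c] := rfl
  rw [ht, get?_pvChange_single]
  simp [melodyB]

theorem melodyB_pair (c d : Char) (rest : List Char) (r : List Char)
    (hg : PySem.Dict.get? pvChange [c, d] = some r) :
    melodyB (c :: d :: rest) = r ++ melodyB rest := by
  rw [melodyB]
  have ht : (c :: d :: rest).take 2 = [c, d] := rfl
  have hd2 : (c :: d :: rest).drop 2 = rest := rfl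
  rw [ht, hd2, hg]

theorem melodyB_cons_none (c d : Char) (rest : List Char)
    (hg : PySem.Dict.get? pvChange [c, d] = none) :
    melodyB (c :: d :: rest) = c :: melodyB (d :: rest) := by
  rw [melodyB]
  have ht : (c :: d :: rest).take 2 = [c, d] := rfl
  rw [ht, hg]

theorem csS_cons_ne (c d : Char) (rest : List Char) (hd : d ≠ '#') :
    csS (c :: d :: rest) = (csS (d :: rest)).map (c :: ·) := by
  rw [csS, if_neg hd]

theorem csA_eq_csS (l : List Char) : ∀ j acc, csA l j acc = (csS (l.drop j)).map (acc ++ ·) := by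
  suffices H : ∀ n j acc, l.length - j = n → csA l j acc = (csS (l.drop j)).map (acc ++ ·) by
    intro j acc; exact H _ j acc rfl
  intro n
  induction n using Nat.strong_induction_on with
  | _ n IH =>
    intro j acc hn
    rw [csA]
    by_cases h1 : j < l.length
    · rw [if_pos h1]
      have hdropj : l.drop j = l[j] :: l.drop (j+1) := List.drop_eq_getElem_cons h1
      by_cases h2 : j + 1 < l.length ∧ l.getD (j+1) ' ' = '#'
      · obtain ⟨h2a, h2b⟩ := h2
        have h2' : j + 1 < l.length ∧ l.getD (j+1) ' ' = '#' := ⟨h2a, h2b⟩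
        rw [if_pos h2']
        have hgd1 : l.getD (j+1) ' ' = l[j+1] := List.getD_eq_getElem l ' ' h2a
        have hgd0 : l.getD j ' ' = l[j] := List.getD_eq_getElem l ' ' h1
        have hdropj1 : l.drop (j+1) = l[j+1] :: l.drop (j+2) := List.drop_eq_getElem_cons h2a
        have hhash : l[j+1] = '#' := by rw [← hgd1]; exact h2b
        rw [hgd0, hgd1, hhash, hdropj, hdropj1, hhash]
        cases hg : PySem.Dict.get? pvChange [l[j], '#'] with
        | none => simp [csS, hg]
        | some r =>
          dsimp only
          rw [IH (l.length - (j+2)) (by omega) (j+2) (acc ++ r) rfl]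
          cases hcs : csS (l.drop (j+2)) <;> simp [csS, hg, hcs, List.append_assoc]
      · rw [if_neg h2]
        have hgd0 : l.getD j ' ' = l[j] := List.getD_eq_getElem l ' ' h1
        rw [IH (l.length - (j+1)) (by omega) (j+1) (acc ++ [l.getD j ' ']) rfl]
        rw [hdropj, hgd0]
        by_cases h3 : j + 1 < l.length
        · have hdropj1 : l.drop (j+1) = l[j+1] :: l.drop (j+2) := List.drop_eq_getElem_cons h3
          have hne : l[j+1] ≠ '#' := by
            intro hc
            exact h2 ⟨h3, by rw [List.getD_eq_getElem l ' ' h3]; exact hc⟩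
          rw [hdropj1, csS_cons_ne _ _ _ hne]
          cases hcs : csS (l[j+1] :: l.drop (j+2)) <;>
            simp [List.append_assoc]
        · have hd0 : l.drop (j+1) = [] := List.drop_eq_nil_of_le (by omega)
          simp [hd0, csS]
    · rw [if_neg h1]
      have hd0 : l.drop j = [] := List.drop_eq_nil_of_le (by omega)
      simp [hd0, csS]

theorem melodyB_eq_csS : ∀ l t, csS l = some t → melodyB l = t := by
  suffices H : ∀ n (l : List Char), l.length ≤ n → ∀ t, csS l = some t → melodyB l = t by
    intro l t h; exact H l.length l le_rfl t h
  intro n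
  induction n with
  | zero =>
    intro l hl t h
    have hnil : l = [] := List.length_eq_zero_iff.mp (by omega)
    subst hnil
    simp [csS] at h
    subst h
    simp [melodyB]
  | succ n IH =>
    intro l hl t h
    cases l with
    | nil =>
      simp [csS] at h
      subst h
      simp [melodyB]
    | cons c l' =>
      cases l' with
      | nil =>
        simp [csS] at h
        subst h
        exact melodyB_single c
      | cons d rest =>
        by_cases hd : d = '#'
        · subst hd
          rw [csS, if_pos rfl] at h
          cases hg : PySem.Dict.get? pvChange [c, '#'] with
          | none => rw [hg] at h; simp at h
          | some r =>
            rw [hg] at h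
            cases hcs : csS rest with
            | none => rw [hcs] at h; simp at h
            | some t' =>
              rw [hcs] at h
              simp only [Option.map_some, Option.some.injEq] at h
              rw [melodyB_pair c '#' rest r hg,
                  IH rest (by simp at hl; omega) t' hcs, h]
        · rw [csS, if_neg hd] at h
          cases hcs : csS (d :: rest) with
          | none => rw [hcs] at h; simp at h
          | some t' =>
            rw [hcs] at h
            simp only [Option.map_some, Option.some.injEq] at h
            rw [melodyB_cons_none c d rest (get?_pvChange_ne_hash c d hd),
                IH (d :: rest) (by simp at hl ⊢; omega) t' hcs, h]

-- ---- the validity predicate characterizes where the scan returns ----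

theorem noteOK_spec {l : List Char} {i : Nat} (h : pvNoteOK l = true) (hi : i < l.length)
    (hh : l[i]? = some '#') :
    (i = 0 ∨ l[i-1]? = some '#' ∨ ∃ c ∈ pvNotes, l[i-1]? = some c)
    ∧ ¬(l[i+1]? = some '#' ∧ l[i+2]? = some '#')
    ∧ (i = 0 → ¬ l[1]? = some '#') := by
  unfold pvNoteOK at h
  rw [List.all_eq_true] at h
  have h2 := h i (List.mem_range.mpr hi)
  simp only [hh, bne_self_eq_false, Bool.false_or, Bool.and_eq_true, Bool.or_eq_true,
    decide_eq_true_eq, beq_iff_eq, List.any_eq_true, Bool.not_eq_true', Bool.and_eq_false_iff,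
    bne_iff_ne, ne_eq] at h2
  obtain ⟨⟨ha, hb⟩, hc⟩ := h2
  refine ⟨by tauto, ?_, ?_⟩
  · rintro ⟨x1, x2⟩
    rcases hb with hb | hb
    · rw [x1] at hb; simp at hb
    · rw [x2] at hb; simp at hb
  · intro h0
    rcases hc with hc | hc
    · simp [h0] at hc
    · exact hc

theorem noteOK_goal {l : List Char} {i : Nat}
    (hA : i = 0 ∨ l[i-1]? = some '#' ∨ ∃ c ∈ pvNotes, l[i-1]? = some c)
    (hB : ¬(l[i+1]? = some '#' ∧ l[i+2]? = some '#'))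
    (hC : i = 0 → ¬ l[1]? = some '#') :
    (l[i]? != some '#' ||
    ((decide (i = 0) || l[i-1]? == some '#' || pvNotes.any fun c => l[i-1]? == some c)
     && !(l[i+1]? == some '#' && l[i+2]? == some '#')
     && (!decide (i = 0) || l[1]? != some '#'))) = true := by
  simp only [Bool.or_eq_true, Bool.and_eq_true, decide_eq_true_eq, beq_iff_eq,
    List.any_eq_true, Bool.not_eq_true', Bool.and_eq_false_iff, bne_iff_ne, ne_eq]
  right
  refine ⟨⟨by tauto, ?_⟩, ?_⟩
  · by_cases hx : l[i+1]? = some '#'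
    · right; simp only [beq_eq_false_iff_ne, ne_eq]; exact fun hy => hB ⟨hx, hy⟩
    · left; simp only [beq_eq_false_iff_ne, ne_eq]; exact hx
  · by_cases h0 : i = 0
    · right; exact hC h0
    · left; simp [h0]

theorem noteOK_drop2 {c d : Char} {rest : List Char} (hd : d = '#')
    (h : pvNoteOK (c :: d :: rest) = true) : pvNoteOK rest = true := by
  subst hd
  unfold pvNoteOK
  rw [List.all_eq_true]
  intro i hi'
  have hi : i < rest.length := List.mem_range.mp hi'
  by_cases hh : rest[i]? = some '#'
  case neg => simp [hh]
  case pos =>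
    have hsh : ∀ k : Nat, (c :: '#' :: rest)[k+2]? = rest[k]? := by intro k; simp
    have hbig := noteOK_spec (l := c :: '#' :: rest) (i := i + 2) h
      (by simp; omega) (by rw [hsh i]; exact hh)
    obtain ⟨ha, hb, -⟩ := hbig
    apply noteOK_goal
    · cases i with
      | zero => exact Or.inl rfl
      | succ k =>
        rcases ha with h0 | hp | hn
        · omega
        · refine Or.inr (Or.inl ?_)
          have he : k + 2 + 1 - 1 = k + 2 := rfl
          rw [he, hsh k] at hp
          simpa using hp
        · refine Or.inr (Or.inr ?_)
          obtain ⟨ch, hch, hp⟩ := hn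
          have he : k + 2 + 1 - 1 = k + 2 := rfl
          rw [he, hsh k] at hp
          exact ⟨ch, hch, by simpa using hp⟩
    · intro hx
      obtain ⟨x1, x2⟩ := hx
      exact hb ⟨by rw [hsh (i+1)]; exact x1, by rw [hsh (i+2)]; exact x2⟩
    · intro h0
      subst h0
      have hone : (c :: '#' :: rest)[1]? = some '#' := by simp
      have h1 := noteOK_spec (l := c :: '#' :: rest) (i := 1) h (by simp) hone
      obtain ⟨-, hb1, -⟩ := h1
      intro hcon
      exact hb1 ⟨by rw [hsh 0]; exact hh, by rw [hsh 1]; exact hcon⟩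

theorem noteOK_tail {c d : Char} {rest : List Char} (hd : d ≠ '#')
    (h : pvNoteOK (c :: d :: rest) = true) : pvNoteOK (d :: rest) = true := by
  unfold pvNoteOK
  rw [List.all_eq_true]
  intro i hi'
  have hi : i < (d :: rest).length := List.mem_range.mp hi'
  by_cases hh : (d :: rest)[i]? = some '#'
  case neg => simp [hh]
  case pos =>
    have hsh : ∀ k : Nat, (c :: d :: rest)[k+1]? = (d :: rest)[k]? := by intro k; simp
    cases i with
    | zero => exact absurd (by simpa using hh) hd
    | succ k =>
      have hbig := noteOK_spec (l := c :: d :: rest) (i := k + 2) h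
        (by simp at hi ⊢; omega) (by rw [show k+2 = (k+1)+1 from rfl, hsh (k+1)]; exact hh)
      obtain ⟨ha, hb, -⟩ := hbig
      apply noteOK_goal
      · rcases ha with h0 | hp | hn
        · omega
        · refine Or.inr (Or.inl ?_)
          have he : k + 2 - 1 = k + 1 := rfl
          rw [he, hsh k] at hp
          simpa using hp
        · refine Or.inr (Or.inr ?_)
          obtain ⟨ch, hch, hp⟩ := hn
          have he : k + 2 - 1 = k + 1 := rfl
          rw [he, hsh k] at hp
          exact ⟨ch, hch, by simpa using hp⟩
      · intro hx
        obtain ⟨x1, x2⟩ := hx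
        exact hb ⟨by rw [show k+2+1 = (k+1+1)+1 from rfl, hsh (k+1+1)]; exact x1,
                  by rw [show k+2+2 = (k+1+2)+1 from rfl, hsh (k+1+2)]; exact x2⟩
      · omega

theorem csS_isSome : ∀ l : List Char, pvNoteOK l = true → (csS l).isSome := by
  suffices H : ∀ n (l : List Char), l.length ≤ n → pvNoteOK l = true → (csS l).isSome by
    intro l h; exact H l.length l le_rfl h
  intro n
  induction n with
  | zero =>
    intro l hl _
    have hnil : l = [] := List.length_eq_zero_iff.mp (by omega)
    subst hnil
    simp [csS]
  | succ n IH =>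
    intro l hl h
    cases l with
    | nil => simp [csS]
    | cons c l' =>
      cases l' with
      | nil => simp [csS]
      | cons d rest =>
        by_cases hd : d = '#'
        · subst hd
          rw [csS, if_pos rfl]
          cases hg : PySem.Dict.get? pvChange [c, '#'] with
          | some r =>
            have := IH rest (by simp at hl; omega) (noteOK_drop2 rfl h)
            cases hcs : csS rest with
            | none => rw [hcs] at this; simp at this
            | some t => simp
          | none =>
            exfalso
            have h1 := noteOK_spec (l := c :: '#' :: rest) (i := 1) h (by simp) (by simp)
            obtain ⟨ha, -, -⟩ := h1
            rcases ha with h0 | hp | hn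
            · omega
            · simp at hp
              subst hp
              have h0 := noteOK_spec (l := '#' :: '#' :: rest) (i := 0) h (by simp) (by simp)
              obtain ⟨-, -, hc⟩ := h0
              exact hc rfl (by simp)
            · obtain ⟨ch, hch, hp⟩ := hn
              simp at hp
              subst hp
              have hns := get?_pvChange_note _ hch
              rw [hg] at hns
              simp at hns
        · rw [csS, if_neg hd]
          have := IH (d :: rest) (by simp at hl ⊢; omega) (noteOK_tail hd h)
          cases hcs : csS (d :: rest) with
          | none => rw [hcs] at this; simp at this
          | some t => simp

theorem csS_ne_nil : ∀ l t, csS l = some t → l ≠ [] → t ≠ [] := by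
  intro l t h hl
  cases l with
  | nil => exact absurd rfl hl
  | cons c l' =>
    cases l' with
    | nil =>
      simp [csS] at h
      simp [← h]
    | cons d rest =>
      by_cases hd : d = '#'
      · subst hd
        rw [csS, if_pos rfl] at h
        cases hg : PySem.Dict.get? pvChange [c, '#'] with
        | none => rw [hg] at h; simp at h
        | some r =>
          rw [hg] at h
          cases hcs : csS rest with
          | none => rw [hcs] at h; simp at h
          | some t' =>
            rw [hcs] at h
            simp only [Option.map_some, Option.some.injEq] at h
            rw [← h]
            simp [get?_pvChange_some_ne_nil hg]
      · rw [csS, if_neg hd] at h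
        cases hcs : csS (d :: rest) with
        | none => rw [hcs] at h; simp at h
        | some t' =>
          rw [hcs] at h
          simp only [Option.map_some, Option.some.injEq] at h
          simp [← h]

-- ---- the repeat loop, in closed form ----

theorem pyRepeat_peel (ns : List Char) (q : Int) (hq : 1 ≤ q) :
    PySem.List.pyRepeat ns q = ns ++ PySem.List.pyRepeat ns (q - 1) := by
  unfold PySem.List.pyRepeat
  have hq' : q.toNat = (q - 1).toNat + 1 := by omega
  rw [hq', List.replicate_succ, List.flatten_cons]

theorem playLoop_eq (ns : List Char) (hne : ns ≠ []) :
    ∀ tmp plays, 0 ≤ tmp →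
    playLoopA ns tmp plays =
      some (plays ++ (PySem.List.pyRepeat ns (PySem.Int.floordiv tmp ns.length)
            ++ PySem.List.slice ns none (some (PySem.Int.mod tmp ns.length)))) := by
  have hL0 : ns.length ≠ 0 := by simpa using hne
  have hL : (0 : Int) < ns.length := by exact_mod_cast Nat.pos_of_ne_zero hL0
  suffices H : ∀ n (tmp : Int) plays, tmp.toNat = n → 0 ≤ tmp → playLoopA ns tmp plays =
      some (plays ++ (PySem.List.pyRepeat ns (PySem.Int.floordiv tmp ns.length)
            ++ PySem.List.slice ns none (some (PySem.Int.mod tmp ns.length)))) by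
    intro tmp plays h0; exact H _ tmp plays rfl h0
  intro n
  induction n using Nat.strong_induction_on with
  | _ n IH =>
    intro tmp plays hn h0
    rw [playLoopA, if_neg hL0]
    rw [PySem.Int.floordiv_eq_ediv_of_pos hL, PySem.Int.mod_eq_emod_of_pos hL]
    by_cases hlt : tmp < (ns.length : Int)
    · rw [if_pos hlt]
      rw [Int.ediv_eq_zero_of_lt h0 hlt, Int.emod_eq_of_lt h0 hlt]
      simp [PySem.List.pyRepeat]
    · rw [if_neg hlt]
      have hrec := IH (tmp - ns.length).toNat (by omega) (tmp - ns.length) (plays ++ ns)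
        rfl (by omega)
      rw [hrec]
      rw [PySem.Int.floordiv_eq_ediv_of_pos hL, PySem.Int.mod_eq_emod_of_pos hL]
      have hdiv : (tmp - ns.length) / ns.length = tmp / ns.length + (-1) := by
        have hx := Int.add_mul_ediv_right tmp (-1) (c := (ns.length : Int)) (by omega)
        rw [← hx]; ring_nf
      have hmod : (tmp - ns.length) % (ns.length : Int) = tmp % ns.length := by
        rw [Int.sub_emod, Int.emod_self, sub_zero, Int.emod_emod_of_dvd _ dvd_rfl]
      rw [hdiv, hmod]
      have hq : 1 ≤ tmp / (ns.length : Int) := by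
        rw [Int.le_ediv_iff_mul_le hL]
        omega
      have hpeel := pyRepeat_peel ns (tmp / (ns.length : Int)) hq
      rw [show tmp / (ns.length : Int) + (-1) = tmp / (ns.length : Int) - 1 by ring, hpeel]
      simp [List.append_assoc]

-- ---- per-item bodies, related through one candidate computation ----

def pvPlays (parts : List (List Char)) : List Char :=
  if pvPlayTime parts > ((melodyB (parts.getD 3 [])).length : Int) then
    PySem.List.pyRepeat (melodyB (parts.getD 3 []))
        (PySem.Int.floordiv (pvPlayTime parts) (melodyB (parts.getD 3 [])).length)
      ++ PySem.List.slice (melodyB (parts.getD 3 [])) none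
        (some (PySem.Int.mod (pvPlayTime parts) (melodyB (parts.getD 3 [])).length))
  else PySem.List.slice (melodyB (parts.getD 3 [])) none (some (pvPlayTime parts))

def pvCand (mL : List Char) (p : Int × String) : Option (Int × Int × String) :=
  if PySem.Chars.isIn mL (pvPlays (PySem.Chars.splitOn p.2.toList [','])) then
    some (pvPlayTime (PySem.Chars.splitOn p.2.toList [',']), p.1,
      String.ofList ((PySem.Chars.splitOn p.2.toList [',']).getD 2 []))
  else none

def bstepA (h : Option (Int × Int × String)) (x : Int × Int × String) :
    Option (Int × Int × String) :=
  match h with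
  | none => some x
  | some h => if (decide ((-x.1) < (-h.1)) || (!decide ((-h.1) < (-x.1)) && decide (x.2.1 < h.2.1)))
              then some x else some h

def bstepB (b : Option (Int × String)) (x : Int × Int × String) : Option (Int × String) :=
  match b with
  | none => some (x.1, x.2.2)
  | some y => if y.1 < x.1 then some (x.1, x.2.2) else some y

theorem infoOK_parts {info : String} (h : pvInfoOK info = true) :
    4 ≤ (PySem.Chars.splitOn info.toList [',']).length
    ∧ (PySem.Int.ofChars? (PySem.List.slice ((PySem.Chars.splitOn info.toList [',']).getD 1 []) none (some 2))).isSome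
    ∧ (PySem.Int.ofChars? (PySem.List.slice ((PySem.Chars.splitOn info.toList [',']).getD 0 []) none (some 2))).isSome
    ∧ (PySem.Int.ofChars? (PySem.List.slice ((PySem.Chars.splitOn info.toList [',']).getD 1 []) (some 3) none)).isSome
    ∧ (PySem.Int.ofChars? (PySem.List.slice ((PySem.Chars.splitOn info.toList [',']).getD 0 []) (some 3) none)).isSome
    ∧ pvNoteOK ((PySem.Chars.splitOn info.toList [',']).getD 3 []) = true
    ∧ ((PySem.Chars.splitOn info.toList [',']).getD 3 [] = [] →
        pvPlayTime (PySem.Chars.splitOn info.toList [',']) ≤ 0) := by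
  unfold pvInfoOK at h
  simp only [Bool.and_eq_true, decide_eq_true_eq, Bool.or_eq_true, bne_iff_ne, ne_eq] at h
  obtain ⟨⟨⟨⟨⟨⟨h1, h2⟩, h3⟩, h4⟩, h5⟩, h6⟩, h7⟩ := h
  refine ⟨h1, h2, h3, h4, h5, h6, ?_⟩
  intro hnil
  rcases h7 with h7 | h7
  · exact absurd hnil h7
  · exact h7

set_option maxHeartbeats 1000000 in
theorem itemA_ok (mL : List Char) (cl : List (Int × Int × String)) (i : Int) (info : String)
    (hok : pvInfoOK info = true) :
    itemA mL cl (i, info) = some (cl ++ (pvCand mL (i, info)).toList) := by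
  obtain ⟨hlen, hp1, hp0, hp3, hp2, hnote, hdiv⟩ := infoOK_parts hok
  set parts := PySem.Chars.splitOn info.toList [','] with hparts
  set sc := parts.getD 3 [] with hsc
  have h3 : parts[3]? = some sc := by
    rw [hsc, List.getD_eq_getElem?_getD, List.getElem?_eq_getElem (by omega)]
    simp
  obtain ⟨tune, htune⟩ := Option.isSome_iff_exists.mp (csS_isSome sc hnote)
  have hmel : melodyB sc = tune := melodyB_eq_csS sc tune htune
  have hcsa : csA sc 0 [] = some tune := by
    rw [csA_eq_csS]; simp [htune]
  obtain ⟨e2, he2⟩ := Option.isSome_iff_exists.mp hp1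
  obtain ⟨s2, hs2⟩ := Option.isSome_iff_exists.mp hp0
  obtain ⟨em, hem⟩ := Option.isSome_iff_exists.mp hp3
  obtain ⟨sm, hsm⟩ := Option.isSome_iff_exists.mp hp2
  have hpt : pvPlayTime parts = (e2 - s2) * 60 + (em - sm) := by
    unfold pvPlayTime
    rw [he2, hs2, hem, hsm]
    simp only [Option.getD_some]
    ring
  unfold itemA pvCand pvPlays
  simp only [← hparts, h3, hcsa, he2, hs2, hem, hsm, hmel, ← hsc, ← hpt]
  by_cases hbig : pvPlayTime parts > (tune.length : Int)
  · have htne : tune ≠ [] := by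
      intro hnil
      by_cases hscn : sc = []
      · have hle := hdiv hscn
        rw [hnil] at hbig
        simp at hbig
        omega
      · exact csS_ne_nil sc tune htune hscn hnil
    rw [if_pos hbig, if_pos hbig]
    rw [playLoop_eq tune htne _ [] (by
      have hge : (0:Int) ≤ (tune.length : Int) := by positivity
      omega)]
    by_cases hin : PySem.Chars.isIn mL
        (PySem.List.pyRepeat tune (PySem.Int.floordiv (pvPlayTime parts) tune.length)
          ++ PySem.List.slice tune none (some (PySem.Int.mod (pvPlayTime parts) tune.length)))
        = true
    · simp [hin]
    · simp only [Bool.not_eq_true] at hin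
      simp [hin]
  · rw [if_neg hbig, if_neg hbig]
    by_cases hin : PySem.Chars.isIn mL
        (PySem.List.slice tune none (some (pvPlayTime parts))) = true
    · simp [hin]
    · simp only [Bool.not_eq_true] at hin
      simp [hin]

set_option maxHeartbeats 1000000 in
theorem itemB_ok (target : List Char) (b : Option (Int × String)) (i : Int) (info : String)
    (hok : pvInfoOK info = true) :
    itemB target b (i, info) = some (((pvCand target (i, info)).toList).foldl bstepB b) := by
  obtain ⟨hlen, hp1, hp0, hp3, hp2, hnote, hdiv⟩ := infoOK_parts hok
  set parts := PySem.Chars.splitOn info.toList [','] with hparts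
  set sc := parts.getD 3 [] with hsc
  have h3 : parts[3]? = some sc := by
    rw [hsc, List.getD_eq_getElem?_getD, List.getElem?_eq_getElem (by omega)]
    simp
  obtain ⟨tune, htune⟩ := Option.isSome_iff_exists.mp (csS_isSome sc hnote)
  have hmel : melodyB sc = tune := melodyB_eq_csS sc tune htune
  obtain ⟨e2, he2⟩ := Option.isSome_iff_exists.mp hp1
  obtain ⟨s2, hs2⟩ := Option.isSome_iff_exists.mp hp0
  obtain ⟨em, hem⟩ := Option.isSome_iff_exists.mp hp3
  obtain ⟨sm, hsm⟩ := Option.isSome_iff_exists.mp hp2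
  have hpt : pvPlayTime parts = (e2 - s2) * 60 + em - sm := by
    unfold pvPlayTime
    rw [he2, hs2, hem, hsm]
    simp only [Option.getD_some]
  unfold itemB pvCand pvPlays
  simp only [← hparts, h3, he2, hs2, hem, hsm, hmel, ← hsc, ← hpt]
  by_cases hbig : pvPlayTime parts > (tune.length : Int)
  · have htne : tune ≠ [] := by
      intro hnil
      by_cases hscn : sc = []
      · have hle := hdiv hscn
        rw [hnil] at hbig
        simp at hbig
        omega
      · exact csS_ne_nil sc tune htune hscn hnil
    rw [if_pos hbig, if_pos hbig]
    have hfd : PySem.Int.floordiv? (pvPlayTime parts) (tune.length : Int)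
        = some (PySem.Int.floordiv (pvPlayTime parts) (tune.length : Int)) := by
      simp [PySem.Int.floordiv?, PySem.Int.floordiv, htne]
    have hmd : PySem.Int.mod? (pvPlayTime parts) (tune.length : Int)
        = some (PySem.Int.mod (pvPlayTime parts) (tune.length : Int)) := by
      simp [PySem.Int.mod?, PySem.Int.mod, htne]
    rw [hfd, hmd]
    by_cases hin : PySem.Chars.isIn target
        (PySem.List.pyRepeat tune (PySem.Int.floordiv (pvPlayTime parts) tune.length)
          ++ PySem.List.slice tune none (some (PySem.Int.mod (pvPlayTime parts) tune.length)))
        = true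
    · cases b with
      | none => simp [bstepB, hin]
      | some y =>
        by_cases hlt : y.1 < pvPlayTime parts
        · simp [bstepB, hlt, hin]
        · simp [bstepB, hlt, hin]
    · simp only [Bool.not_eq_true] at hin
      simp [hin]
  · rw [if_neg hbig, if_neg hbig]
    by_cases hin : PySem.Chars.isIn target
        (PySem.List.slice tune none (some (pvPlayTime parts))) = true
    · cases b with
      | none => simp [bstepB, hin]
      | some y =>
        by_cases hlt : y.1 < pvPlayTime parts
        · simp [bstepB, hlt, hin]
        · simp [bstepB, hlt, hin]
    · simp only [Bool.not_eq_true] at hin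
      simp [hin]

-- ---- the two folds over musicinfos ----

def candList (mL : List Char) : List String → Int → List (Int × Int × String)
  | [], _ => []
  | s :: t, start => (pvCand mL (start, s)).toList ++ candList mL t (start + 1)

theorem foldA_eq (mL : List Char) (l : List String) : ∀ (start : Int) cl,
    (∀ s ∈ l, pvInfoOK s = true) →
    (PySem.List.enumerate l start).foldl
      (fun acc p => match acc with | none => none | some cl => itemA mL cl p) (some cl)
    = some (cl ++ candList mL l start) := by
  induction l with
  | nil => intro start cl _; simp [PySem.List.enumerate_nil, candList]
  | cons s t IH =>
    intro start cl hok
    rw [PySem.List.enumerate_cons, List.foldl_cons]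
    have hstep : itemA mL cl (start, s) = some (cl ++ (pvCand mL (start, s)).toList) :=
      itemA_ok mL cl start s (hok s (by simp))
    dsimp only
    rw [hstep, IH (start + 1) _ (fun x hx => hok x (by simp [hx]))]
    rw [candList]
    simp [List.append_assoc]

theorem foldB_eq (target : List Char) (l : List String) : ∀ (start : Int) b,
    (∀ s ∈ l, pvInfoOK s = true) →
    (PySem.List.enumerate l start).foldl
      (fun acc p => match acc with | none => none | some best => itemB target best p) (some b)
    = some ((candList target l start).foldl bstepB b) := by
  induction l with
  | nil => intro start b _; simp [PySem.List.enumerate_nil, candList]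
  | cons s t IH =>
    intro start b hok
    rw [PySem.List.enumerate_cons, List.foldl_cons]
    have hstep := itemB_ok target b start s (hok s (by simp))
    dsimp only
    rw [hstep, IH (start + 1) _ (fun x hx => hok x (by simp [hx]))]
    rw [candList]
    simp [List.foldl_append]

-- ---- head of the stable sort = running best ----

theorem head?_foldl_insertBy {α : Type} (before : α → α → Bool) (l : List α) :
    ∀ acc : List α,
    (l.foldl (fun acc x => PySem.List.insertBy before x acc) acc).head? =
    l.foldl (fun h x => match h with
      | none => some x
      | some h => if before x h then some x else some h) acc.head? := by
  induction l with
  | nil => intro acc; rfl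
  | cons x t IH =>
    intro acc
    rw [List.foldl_cons, List.foldl_cons, IH]
    congr 1
    cases acc with
    | nil => rfl
    | cons y ys =>
      simp only [PySem.List.insertBy, List.head?_cons]
      by_cases hb : before x y = true
      · simp [hb]
      · simp only [Bool.not_eq_true] at hb
        simp [hb]

theorem sorted2_head (cl : List (Int × Int × String)) :
    (PySem.List.sorted2 cl (fun x => -x.1) (fun x => x.2.1)).head? = cl.foldl bstepA none := by
  have hs2 : PySem.List.sorted2 cl (fun x => -x.1) (fun x => x.2.1)
      = cl.foldl (fun acc x => PySem.List.insertBy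
          (fun a b => decide ((-a.1) < (-b.1)) || (!decide ((-b.1) < (-a.1)) && decide (a.2.1 < b.2.1)))
          x acc) [] := rfl
  rw [hs2, head?_foldl_insertBy]
  simp only [List.head?_nil]
  congr 1
  funext h x
  cases h <;> rfl

theorem best_map (cl : List (Int × Int × String))
    (hpw : cl.Pairwise (fun a b => a.2.1 < b.2.1)) :
    ∀ h0 : Option (Int × Int × String),
    (∀ x ∈ cl, ∀ y, h0 = some y → y.2.1 < x.2.1) →
    (cl.foldl bstepA h0).map (fun t => (t.1, t.2.2)) =
      cl.foldl bstepB (h0.map (fun t => (t.1, t.2.2))) := by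
  induction cl with
  | nil => intro h0 _; rfl
  | cons x t IH =>
    intro h0 hlt
    rw [List.foldl_cons, List.foldl_cons]
    rw [List.pairwise_cons] at hpw
    cases h0 with
    | none =>
      simp only [bstepA, bstepB, Option.map_none]
      exact IH hpw.2 (some x) (by
        intro z hz y hy
        injection hy with hy
        subst hy
        exact hpw.1 z hz)
    | some y =>
      have hyx : y.2.1 < x.2.1 := hlt x (by simp) y rfl
      have hnot : ¬ x.2.1 < y.2.1 := by omega
      simp only [bstepA, bstepB, Option.map_some]
      have hcond : (decide ((-x.1) < (-y.1)) || (!decide ((-y.1) < (-x.1)) && decide (x.2.1 < y.2.1)))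
          = decide (y.1 < x.1) := by
        simp only [decide_eq_false hnot, Bool.and_false, Bool.or_false, decide_eq_decide]
        omega
      rw [hcond]
      by_cases hc : y.1 < x.1
      · rw [if_pos (by simpa using hc), if_pos hc]
        exact IH hpw.2 (some x) (by
          intro z hz w hw
          injection hw with hw
          subst hw
          exact hpw.1 z hz)
      · rw [if_neg (by simpa using hc), if_neg hc]
        exact IH hpw.2 (some y) (by
          intro z hz w hw
          injection hw with hw
          subst hw
          exact lt_trans hyx (hpw.1 z hz))

theorem pvCand_idx {mL : List Char} {p : Int × String} {x : Int × Int × String}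
    (h : pvCand mL p = some x) : x.2.1 = p.1 := by
  unfold pvCand at h
  split_ifs at h
  injection h with h
  rw [← h]

theorem candList_lb (mL : List Char) : ∀ (l : List String) (start : Int) x,
    x ∈ candList mL l start → start ≤ x.2.1 := by
  intro l
  induction l with
  | nil => intro start x hx; simp [candList] at hx
  | cons s t IH =>
    intro start x hx
    rw [candList] at hx
    rcases List.mem_append.mp hx with hx | hx
    · cases hc : pvCand mL (start, s) with
      | none => rw [hc] at hx; simp at hx
      | some c =>
        rw [hc] at hx
        simp at hx
        subst hx
        rw [pvCand_idx hc]
    · have := IH (start + 1) x hx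
      omega

theorem candList_pairwise (mL : List Char) : ∀ (l : List String) (start : Int),
    (candList mL l start).Pairwise (fun a b => a.2.1 < b.2.1) := by
  intro l
  induction l with
  | nil => intro start; simp [candList]
  | cons s t IH =>
    intro start
    rw [candList]
    rw [List.pairwise_append]
    refine ⟨?_, IH (start + 1), ?_⟩
    · cases hc : pvCand mL (start, s) <;> simp
    · intro a ha b hb
      have hb1 : start + 1 ≤ b.2.1 := candList_lb mL t (start + 1) b hb
      cases hc : pvCand mL (start, s) with
      | none => rw [hc] at ha; simp at ha
      | some c =>
        rw [hc] at ha
        simp at ha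
        subst ha
        rw [pvCand_idx hc]
        omega

-- ===== VERDICT (by name: the statement is the Claim_ definition above) =====
set_option maxHeartbeats 1000000 in
theorem solution_spec : Claim_equal_solution := by
  unfold Claim_equal_solution
  intro m musicinfos _ hpre
  obtain ⟨hm, hall⟩ := hpre
  unfold Spec_solution solution solution_alt
  obtain ⟨target, htarget⟩ := Option.isSome_iff_exists.mp (csS_isSome m.toList hm)
  have hmel : melodyB m.toList = target := melodyB_eq_csS m.toList target htarget
  have hcsa : csA m.toList 0 [] = some target := by
    rw [csA_eq_csS]; simp [htarget]
  rw [hcsa, hmel]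
  dsimp only
  rw [foldA_eq target musicinfos 0 [] hall, foldB_eq target musicinfos 0 none hall]
  dsimp only
  set cl := candList target musicinfos 0 with hcl
  have hbm := best_map cl (candList_pairwise target musicinfos 0) none (by simp)
  have hhead := sorted2_head cl
  simp only [List.nil_append, Option.map_none] at hbm ⊢
  cases hs : PySem.List.sorted2 cl (fun x => -x.1) (fun x => x.2.1) with
  | nil =>
    rw [hs] at hhead
    simp only [List.head?_nil] at hhead
    rw [← hbm, ← hhead]
    rfl
  | cons h tl =>
    rw [hs] at hhead
    simp only [List.head?_cons] at hhead
    rw [← hbm, ← hhead]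
    rfl
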